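-- pv_equiv track=rewrite | github.com/Ransiki/cubin_runner | 3rdparty/cutlass/tools/scripts/compilation/nvcc-compilation-time-profiling.py | ModuleFilter
-- ===== SOURCE A (Python) =====
-- def ModuleFilter(powerset, kernel_count):
--   step = 1
--   if kernel_count == 2:
--     step = 7
--   elif kernel_count == 4:
--     step = 30
--
--   indices = []
--   filtered_kernels = []
--   for index, kernel in enumerate(powerset):
--     if index % step == 0:
--       indices.append(index)
--       filtered_kernels.append(kernel)
--   return (filtered_kernels, indices)
-- ===== SOURCE B (Python) =====
-- def ModuleFilter(powerset, kernel_count):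
--     step = 7 if kernel_count == 2 else 30 if kernel_count == 4 else 1
--     indices = list(range(0, len(powerset), step))
--     return ([powerset[i] for i in indices], indices)
-- ===== Notes on version B (the rewrite author's own statement) =====
-- stated objective: idiomatic
-- what changed: B computes the kept indices directly as a stride range(0, len, step) and gathers those elements, instead of enumerating every element and testing index % step == 0.
import Mathlib
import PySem

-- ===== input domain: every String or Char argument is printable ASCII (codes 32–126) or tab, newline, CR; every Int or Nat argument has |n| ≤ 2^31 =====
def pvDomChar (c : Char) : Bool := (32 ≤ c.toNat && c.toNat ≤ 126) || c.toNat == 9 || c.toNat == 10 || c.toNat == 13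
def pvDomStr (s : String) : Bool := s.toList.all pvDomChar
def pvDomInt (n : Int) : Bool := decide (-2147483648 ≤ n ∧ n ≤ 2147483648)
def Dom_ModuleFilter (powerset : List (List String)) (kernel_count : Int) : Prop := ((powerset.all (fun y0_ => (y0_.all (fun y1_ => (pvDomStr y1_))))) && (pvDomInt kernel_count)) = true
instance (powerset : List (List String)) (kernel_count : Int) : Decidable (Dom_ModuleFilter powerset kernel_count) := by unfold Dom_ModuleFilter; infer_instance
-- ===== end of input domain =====

-- B replaces A's scan-and-test loop (enumerate + index % step == 0) by computing the kept
-- indices directly with a stride range and gathering those elements (idiomatic; same result).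

-- ===== PORT A =====
def ModuleFilter (powerset : List (List String)) (kernel_count : Int) : List (List String) × List Int :=
  let step : Int := if kernel_count == 2 then 7 else if kernel_count == 4 then 30 else 1
  let r := (PySem.List.enumerate powerset 0).foldl
    (fun (acc : List (List String) × List Int) (p : Int × List String) =>
      if PySem.Int.mod p.1 step == 0 then (acc.1 ++ [p.2], acc.2 ++ [p.1]) else acc)
    ([], [])
  (r.1, r.2)

-- ===== PORT B =====
def ModuleFilter_alt (powerset : List (List String)) (kernel_count : Int) : List (List String) × List Int :=
  let step : Int := if kernel_count == 2 then 7 else if kernel_count == 4 then 30 else 1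
  let indices := PySem.List.pyRange 0 (PySem.List.len powerset) step
  -- powerset[i]: i is always in range here, so the total form pyGetD is exact
  (indices.map (fun i => PySem.List.pyGetD powerset i []), indices)

-- ===== PRECONDITION & SPEC =====
def Spec_ModuleFilter (powerset : List (List String)) (kernel_count : Int) (out : List (List String) × List Int) : Prop := out = ModuleFilter_alt powerset kernel_count
instance (powerset : List (List String)) (kernel_count : Int) (out : List (List String) × List Int) : Decidable (Spec_ModuleFilter powerset kernel_count out) := by unfold Spec_ModuleFilter; infer_instance

-- ===== CLAIM (what is proved, stated in full; the proofs are below) =====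
def Claim_equal_ModuleFilter : Prop := ∀ (powerset : List (List String)) (kernel_count : Int), Dom_ModuleFilter powerset kernel_count → Spec_ModuleFilter powerset kernel_count (ModuleFilter powerset kernel_count)

-- ===== LEMMAS AND PROOFS =====

-- the multiples of s below n, in order: filtering range n equals mapping over the ceiling count
lemma filt (s : Nat) (hs : 0 < s) (n : Nat) :
    (List.range n).filter (fun k => k % s == 0) = (List.range ((n + s - 1) / s)).map (s * ·) := by
  induction n with
  | zero =>
    rw [Nat.div_eq_of_lt (show 0 + s - 1 < s by omega)]
    simp
  | succ n ih =>
    rw [List.range_succ, List.filter_append, ih,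
      show n + 1 + s - 1 = n + s from by omega, Nat.add_div_right _ hs]
    have hd := Nat.div_add_mod n s
    have hm := Nat.mod_lt n hs
    have hz : (s - 1) / s = 0 := Nat.div_eq_of_lt (by omega)
    by_cases h : n % s = 0
    · have h1 : (n + s - 1) / s = n / s := by
        rw [show n + s - 1 = s * (n / s) + (s - 1) from by omega, Nat.mul_add_div hs, hz]
        omega
      rw [h1, List.range_succ, List.map_append]
      have hmn : s * (n / s) = n := by omega
      simp [h, hmn]
    · have hone : (n % s - 1 + s) / s = 1 := by
        rw [Nat.add_div_right _ hs, Nat.div_eq_of_lt (show n % s - 1 < s by omega)]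
      have h1 : (n + s - 1) / s = n / s + 1 := by
        rw [show n + s - 1 = s * (n / s) + (n % s - 1 + s) from by omega, Nat.mul_add_div hs, hone]
      simp [h1, h]

-- core: filtering range(n) by j % s == 0 is exactly range(0, n, s)
lemma core (n s : Nat) (hs : 0 < s) :
    (PySem.List.pyRange 0 (n : Int) 1).filter (fun j => PySem.Int.mod j (s : Int) == 0)
      = PySem.List.pyRange 0 (n : Int) (s : Int) := by
  have hcount : (if (0 : Int) < (n : Int) then (((n : Int) - 0 + (s : Int) - 1) / (s : Int)).toNat else 0)
      = (n + s - 1) / s := by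
    by_cases hn : 0 < n
    · rw [if_pos (by exact_mod_cast hn),
        show ((n : Int) - 0 + (s : Int) - 1) = ((n + s - 1 : Nat) : Int) from by omega,
        Int.ofNat_ediv_ofNat, Int.toNat_natCast]
    · have hn0 : n = 0 := by omega
      subst hn0
      rw [if_neg (by norm_num), Nat.div_eq_of_lt (by omega)]
  rw [PySem.List.pyRange_of_pos 0 (n : Int) (s := 1) (by norm_num),
    PySem.List.pyRange_of_pos 0 (n : Int) (s := (s : Int)) (by exact_mod_cast hs), hcount]
  have h1 : (if (0 : Int) < (n : Int) then (((n : Int) - 0 + 1 - 1) / 1).toNat else 0) = n := by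
    by_cases hn : 0 < n
    · rw [if_pos (by exact_mod_cast hn)]
      simp
    · have hn0 : n = 0 := by omega
      subst hn0
      norm_num
  rw [h1, List.filter_map]
  have h2 : ((fun j => PySem.Int.mod j (s : Int) == 0) ∘ (fun k : Nat => (0 : Int) + 1 * (k : Int)))
      = fun k : Nat => k % s == 0 := by
    funext k
    simp [PySem.Int.mod_natCast, Int.natCast_dvd_natCast, Nat.dvd_iff_mod_eq_zero]
  rw [h2, filt s hs n, List.map_map]
  refine List.map_congr_left (fun k _ => ?_)
  simp only [Function.comp_apply]
  push_cast
  ring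

-- both ports produce (map get over the stride indices, the stride indices) for a positive step
lemma main_eq (xs : List (List String)) (s : Nat) (hs : 0 < s) :
    (PySem.List.enumerate xs 0).foldl
      (fun (acc : List (List String) × List Int) (p : Int × List String) =>
        if PySem.Int.mod p.1 (s : Int) == 0 then (acc.1 ++ [p.2], acc.2 ++ [p.1]) else acc)
      ([], [])
    = ((PySem.List.pyRange 0 (PySem.List.len xs) (s : Int)).map (fun i => PySem.List.pyGetD xs i []),
       PySem.List.pyRange 0 (PySem.List.len xs) (s : Int)) := by
  rw [PySem.List.enumerate_eq_map_pyRange xs ([] : List String), List.foldl_map]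
  have hbody : (fun (acc : List (List String) × List Int) (j : Int) =>
      if PySem.Int.mod ((j, PySem.List.pyGetD xs j [])).1 (s : Int) == 0 then
        (acc.1 ++ [((j, PySem.List.pyGetD xs j [])).2], acc.2 ++ [((j, PySem.List.pyGetD xs j [])).1])
      else acc)
      = fun acc j =>
        ((fun a (j : Int) => if PySem.Int.mod j (s : Int) == 0 then a ++ [PySem.List.pyGetD xs j []] else a) acc.1 j,
         (fun a (j : Int) => if PySem.Int.mod j (s : Int) == 0 then a ++ [j] else a) acc.2 j) := by
    funext acc j
    by_cases h : PySem.Int.mod j (s : Int) == 0 <;> simp [h]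
  rw [hbody,
    PySem.List.foldl_prod_mk
      (fun a (j : Int) => if PySem.Int.mod j (s : Int) == 0 then a ++ [PySem.List.pyGetD xs j []] else a)
      (fun a (j : Int) => if PySem.Int.mod j (s : Int) == 0 then a ++ [j] else a)
      (PySem.List.pyRange 0 (PySem.List.len xs)) [] []]
  have hfa := PySem.List.foldl_append_if (fun j => PySem.Int.mod j (s : Int) == 0)
    (fun j => PySem.List.pyGetD xs j []) (PySem.List.pyRange 0 (PySem.List.len xs) 1) []
  have hfb := PySem.List.foldl_append_if (fun j => PySem.Int.mod j (s : Int) == 0)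
    (fun j => j) (PySem.List.pyRange 0 (PySem.List.len xs) 1) []
  simp only [List.nil_append] at hfa hfb
  rw [hfa, hfb]
  rw [show PySem.List.len xs = ((xs.length : Nat) : Int) from rfl]
  rw [core xs.length s hs, List.map_id']

-- ===== VERDICT (by name: the statement is the Claim_ definition above) =====
theorem ModuleFilter_spec : Claim_equal_ModuleFilter := by
  intro powerset kernel_count _
  unfold Spec_ModuleFilter ModuleFilter ModuleFilter_alt
  by_cases h2 : kernel_count == 2
  · simp only [h2]
    exact congrArg (fun r => (r.1, r.2)) (main_eq powerset 7 (by omega))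
  · by_cases h4 : kernel_count == 4
    · simp only [h2, h4]
      exact congrArg (fun r => (r.1, r.2)) (main_eq powerset 30 (by omega))
    · simp only [h2, h4]
      exact congrArg (fun r => (r.1, r.2)) (main_eq powerset 1 (by omega))
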